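-- pv_equiv track=rewrite | github.com/natkramarz/aoc2020 | day 5/1.py | check_highest_row
-- ===== SOURCE A (Python) =====
-- def check_highest_row(array, ptr) -> list:
--     back = []
--     front = []
--     for i in range(0, len(array)):
--         if array[i][ptr] == 'B':
--             back.append(array[i])
--         elif array[i][ptr] == 'F':
--             front.append(array[i])
--     if len(back) != 0:
--         return back
--     return front
-- ===== SOURCE B (Python) =====
-- def check_highest_row(array, ptr) -> list:
--     if any(x[ptr] == 'B' for x in array):
--         return [x for x in array if x[ptr] == 'B']
--     return [x for x in array if x[ptr] == 'F']
-- ===== Notes on version B (the rewrite author's own statement) =====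
-- stated objective: simpler
-- what changed: Replaces the single pass maintaining two accumulator lists (one discarded) with an any() test followed by one filter comprehension that builds only the list actually returned.
import Mathlib
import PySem

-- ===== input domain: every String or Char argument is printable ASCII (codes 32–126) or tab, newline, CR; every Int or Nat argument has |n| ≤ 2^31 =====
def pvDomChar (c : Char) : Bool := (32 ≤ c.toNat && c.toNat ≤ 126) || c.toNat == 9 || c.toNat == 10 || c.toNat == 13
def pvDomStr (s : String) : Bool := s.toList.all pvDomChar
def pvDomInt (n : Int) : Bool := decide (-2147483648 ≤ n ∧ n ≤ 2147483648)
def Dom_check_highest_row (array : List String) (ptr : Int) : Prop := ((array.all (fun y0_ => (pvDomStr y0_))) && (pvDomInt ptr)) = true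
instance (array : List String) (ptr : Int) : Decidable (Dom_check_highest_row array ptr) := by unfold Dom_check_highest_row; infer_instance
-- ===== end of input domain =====

-- B replaces A's single pass with two dual accumulators by an any() test plus one
-- filter comprehension building only the returned list (simpler decomposition, same cost).


-- ===== PORT A =====
-- single pass over range(len(array)) (folded over the list itself, same order),
-- appending to back/front; return back if nonempty else front
def check_highest_row (array : List String) (ptr : Int) : List String :=
  let bf : List String × List String :=
    array.foldl (fun bf x =>
      if PySem.Str.pyGet? x ptr = some 'B' then (bf.1 ++ [x], bf.2)
      else if PySem.Str.pyGet? x ptr = some 'F' then (bf.1, bf.2 ++ [x])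
      else bf) ([], [])
  if bf.1.length ≠ 0 then bf.1 else bf.2

-- ===== PORT B =====
-- any(x[ptr]=='B') test, then one filter building only the returned list
def check_highest_row_alt (array : List String) (ptr : Int) : List String :=
  if array.any (fun x => PySem.Str.pyGet? x ptr = some 'B') then
    array.filter (fun x => PySem.Str.pyGet? x ptr = some 'B')
  else
    array.filter (fun x => PySem.Str.pyGet? x ptr = some 'F')

-- ===== PRECONDITION & SPEC =====
-- Pre_ excludes exactly the inputs where Python A raises IndexError: some entry
-- shorter than the (possibly negative) index ptr.
def Pre_check_highest_row (array : List String) (ptr : Int) : Prop :=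
  ∀ x ∈ array, PySem.Raise.InRange x.toList.length ptr
instance (array : List String) (ptr : Int) : Decidable (Pre_check_highest_row array ptr) := by unfold Pre_check_highest_row; infer_instance
def pvWitness_check_highest_row : List String × Int := (["FB", "BF"], 1)

def Spec_check_highest_row (array : List String) (ptr : Int) (out : List String) : Prop := out = check_highest_row_alt array ptr
instance (array : List String) (ptr : Int) (out : List String) : Decidable (Spec_check_highest_row array ptr out) := by unfold Spec_check_highest_row; infer_instance

-- ===== CLAIM (what is proved, stated in full; the proofs are below) =====
def Claim_equal_check_highest_row : Prop := ∀ (array : List String) (ptr : Int), Dom_check_highest_row array ptr → Pre_check_highest_row array ptr → Spec_check_highest_row array ptr (check_highest_row array ptr)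

-- ===== LEMMAS AND PROOFS =====

-- the fold accumulates exactly the two filters, appended to the starting accumulators
theorem chr_fold_eq_filters (array : List String) (ptr : Int) (b f : List String) :
    array.foldl (fun bf x =>
      if PySem.Str.pyGet? x ptr = some 'B' then (bf.1 ++ [x], bf.2)
      else if PySem.Str.pyGet? x ptr = some 'F' then (bf.1, bf.2 ++ [x])
      else bf) (b, f)
    = (b ++ array.filter (fun x => PySem.Str.pyGet? x ptr = some 'B'),
       f ++ array.filter (fun x => PySem.Str.pyGet? x ptr = some 'F')) := by
  induction array generalizing b f with
  | nil => simp
  | cons x xs ih =>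
    simp only [List.foldl_cons, List.filter_cons, decide_eq_true_eq]
    split_ifs <;> simp_all [PySem.Str.pyGet?]

theorem chr_any_iff_filter_ne (array : List String) (ptr : Int) :
    array.any (fun x => PySem.Str.pyGet? x ptr = some 'B') = true ↔
    (array.filter (fun x => PySem.Str.pyGet? x ptr = some 'B')).length ≠ 0 := by
  simp [List.any_eq_true, List.length_eq_zero_iff, List.filter_eq_nil_iff]

-- ===== VERDICT (by name: the statement is the Claim_ definition above) =====
theorem check_highest_row_spec : Claim_equal_check_highest_row := by
  intro array ptr _ _
  unfold Spec_check_highest_row check_highest_row check_highest_row_alt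
  rw [chr_fold_eq_filters]
  simp only [List.nil_append]
  by_cases h : array.any (fun x => PySem.Str.pyGet? x ptr = some 'B') = true
  · rw [if_pos ((chr_any_iff_filter_ne array ptr).mp h), if_pos h]
  · rw [if_neg (fun hc => h ((chr_any_iff_filter_ne array ptr).mpr hc)), if_neg h]
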